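-- pv_equiv track=rewrite | github.com/piyush-man/kubeeasy | rag/intent.py | _extract_pod
-- ===== SOURCE A (Python) =====
-- def _extract_pod(query: str, data: list) -> str | None:
--     pods = sorted(
--         [r.get("pod", "") for r in data if r.get("pod")],
--         key=len, reverse=True   # longest first avoids prefix matches
--     )
--     for pod in pods:
--         if pod.lower() in query:
--             return pod
--     return None
-- ===== SOURCE B (Python) =====
-- def _extract_pod(query: str, data: list) -> str | None:
--     best = None
--     for r in data:
--         pod = r.get("pod", "")
--         if pod and pod.lower() in query and (best is None or len(pod) > len(best)):
--             best = pod
--     return best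
-- ===== Notes on version B (the rewrite author's own statement) =====
-- stated objective: simpler
-- what changed: Replaced build-a-list + sort-by-length + linear scan with a single accumulator pass over data keeping the longest matching pod (strict > reproduces the stable-sort tie-break).
import Mathlib
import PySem

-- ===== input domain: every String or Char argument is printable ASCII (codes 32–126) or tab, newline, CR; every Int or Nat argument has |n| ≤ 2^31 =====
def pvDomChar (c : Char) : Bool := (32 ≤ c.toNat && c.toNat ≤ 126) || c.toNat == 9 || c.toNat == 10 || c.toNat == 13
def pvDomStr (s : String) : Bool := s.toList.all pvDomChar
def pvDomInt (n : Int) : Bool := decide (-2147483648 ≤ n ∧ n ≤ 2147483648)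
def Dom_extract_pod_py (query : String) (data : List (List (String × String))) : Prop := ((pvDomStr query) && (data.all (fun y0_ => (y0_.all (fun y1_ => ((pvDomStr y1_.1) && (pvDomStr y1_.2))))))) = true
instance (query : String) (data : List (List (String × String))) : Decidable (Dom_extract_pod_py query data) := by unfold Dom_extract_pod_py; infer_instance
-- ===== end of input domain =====

-- B replaces build-list + stable sort by length + first-match scan with one accumulator
-- pass over data keeping the longest matching pod (objective: simpler).
-- ===== PORT A =====
-- first pod in the list whose lowercased form is a substring of query (the for-loop with early return)
def pvFirstMatchA (query : String) : List String → Option String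
  | [] => none
  | pod :: rest =>
      if PySem.Str.isIn (PySem.Str.lower pod) query then some pod
      else pvFirstMatchA query rest

def extract_pod_py (query : String) (data : List (List (String × String))) : Option String :=
  let pods := PySem.List.sorted
      ((data.filter (fun r => decide (((PySem.Dict.mk r).getD "pod" "") ≠ ""))).map
        (fun r => (PySem.Dict.mk r).getD "pod" ""))
      (fun p => PySem.Str.len p) true
  pvFirstMatchA query pods

-- ===== PORT B =====
-- one iteration of B's loop body
def pvStepB (query : String) (best : Option String) (r : List (String × String)) : Option String :=
  let pod := (PySem.Dict.mk r).getD "pod" ""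
  if pod = "" then best
  else if PySem.Str.isIn (PySem.Str.lower pod) query then
    match best with
    | none => some pod
    | some b => if PySem.Str.len b < PySem.Str.len pod then some pod else best
  else best

def extract_pod_py_alt (query : String) (data : List (List (String × String))) : Option String :=
  data.foldl (pvStepB query) none

-- ===== PRECONDITION & SPEC =====
def Spec_extract_pod_py (query : String) (data : List (List (String × String))) (out : Option String) : Prop := out = extract_pod_py_alt query data
instance (query : String) (data : List (List (String × String))) (out : Option String) : Decidable (Spec_extract_pod_py query data out) := by unfold Spec_extract_pod_py; infer_instance

-- ===== CLAIM (what is proved, stated in full; the proofs are below) =====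
def Claim_equal_extract_pod_py : Prop := ∀ (query : String) (data : List (List (String × String))), Dom_extract_pod_py query data → Spec_extract_pod_py query data (extract_pod_py query data)

-- ===== LEMMAS AND PROOFS =====

-- the common "keep the longer match" step both programs reduce to, on an already-extracted pod
def pvStep2 (query : String) (best : Option String) (pod : String) : Option String :=
  if PySem.Str.isIn (PySem.Str.lower pod) query then
    match best with
    | none => some pod
    | some b => if PySem.Str.len b < PySem.Str.len pod then some pod else best
  else best

theorem pvFirstMatchA_mem (query : String) (l : List String) (q : String)
    (h : pvFirstMatchA query l = some q) : q ∈ l := by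
  induction l with
  | nil => simp [pvFirstMatchA] at h
  | cons a t ih =>
    simp only [pvFirstMatchA] at h
    split at h
    · cases h; exact List.mem_cons_self
    · exact List.mem_cons_of_mem _ (ih h)

theorem pvFirstMatchA_insertBy (query x : String) (l : List String)
    (hp : l.Pairwise (fun a b => PySem.Str.len b ≤ PySem.Str.len a)) :
    pvFirstMatchA query
        (PySem.List.insertBy (fun a b => decide (PySem.Str.len b < PySem.Str.len a)) x l)
      = pvStep2 query (pvFirstMatchA query l) x := by
  have heq : ∀ (p : String) (l' : List String), pvFirstMatchA query (p :: l') =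
      if PySem.Str.isIn (PySem.Str.lower p) query then some p else pvFirstMatchA query l' :=
    fun p l' => rfl
  induction l with
  | nil => simp [PySem.List.insertBy, pvFirstMatchA, pvStep2]
  | cons a t ih =>
    have hpt : t.Pairwise (fun a b => PySem.Str.len b ≤ PySem.Str.len a) := hp.of_cons
    have hat : ∀ b ∈ t, PySem.Str.len b ≤ PySem.Str.len a :=
      fun b hb => List.rel_of_pairwise_cons hp hb
    by_cases hlt : PySem.Str.len a < PySem.Str.len x
    · have hlt' : a.length < x.length := by simpa using hlt
      have h1 : PySem.List.insertBy (fun a b => decide (PySem.Str.len b < PySem.Str.len a)) x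
          (a :: t) = x :: a :: t := by simp [PySem.List.insertBy, hlt']
      rw [h1, heq]
      by_cases hPx : PySem.Str.isIn (PySem.Str.lower x) query = true
      · have hPx' : PySem.Chars.isIn (PySem.Chars.lower x.toList) query.toList = true := by
          simpa using hPx
        rw [if_pos hPx]
        cases hF : pvFirstMatchA query (a :: t) with
        | none => simp [pvStep2, hPx']
        | some q =>
          have hq : q ∈ a :: t := pvFirstMatchA_mem query _ q hF
          have hq' : PySem.Str.len q < PySem.Str.len x := by
            rcases List.mem_cons.mp hq with h | h
            · rw [h]; exact hlt
            · exact lt_of_le_of_lt (hat q h) hlt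
          have hq'' : q.length < x.length := by simpa using hq'
          simp [pvStep2, hPx', hq'']
      · have hPx' : PySem.Chars.isIn (PySem.Chars.lower x.toList) query.toList = false := by
          simpa using hPx
        rw [if_neg hPx]
        simp [pvStep2, hPx']
    · have hlt' : ¬ a.length < x.length := by simpa using hlt
      have h1 : PySem.List.insertBy (fun a b => decide (PySem.Str.len b < PySem.Str.len a)) x
          (a :: t)
          = a :: PySem.List.insertBy (fun a b => decide (PySem.Str.len b < PySem.Str.len a)) x t := by
        simp [PySem.List.insertBy, hlt']
      rw [h1, heq, heq]
      by_cases hPa : PySem.Str.isIn (PySem.Str.lower a) query = true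
      · rw [if_pos hPa, if_pos hPa]
        simp [pvStep2, hlt']
      · rw [if_neg hPa, if_neg hPa]
        exact ih hpt

theorem pvFirstMatchA_sorted (query : String) (xs : List String) :
    pvFirstMatchA query (PySem.List.sorted xs (fun p => PySem.Str.len p) true)
      = xs.foldl (pvStep2 query) none := by
  induction xs using List.reverseRecOn with
  | nil => simp [PySem.List.sorted_rev_eq_foldl_insertBy, pvFirstMatchA]
  | append_singleton xs x ih =>
    rw [PySem.List.sorted_rev_eq_foldl_insertBy, List.foldl_append,
        ← PySem.List.sorted_rev_eq_foldl_insertBy, List.foldl_append]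
    simp only [List.foldl_cons, List.foldl_nil]
    rw [pvFirstMatchA_insertBy query x _
          (PySem.List.sorted_pairwise_rev xs (fun p => PySem.Str.len p)), ih]

theorem pvFoldl_stepB_eq (query : String) (data : List (List (String × String)))
    (b0 : Option String) :
    data.foldl (pvStepB query) b0
      = (((data.filter (fun r => decide (((PySem.Dict.mk r).getD "pod" "") ≠ ""))).map
          (fun r => (PySem.Dict.mk r).getD "pod" "")).foldl (pvStep2 query) b0) := by
  induction data generalizing b0 with
  | nil => rfl
  | cons r d ih =>
    by_cases h : (PySem.Dict.mk r).getD "pod" "" = ""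
    · simp only [List.foldl_cons, List.filter_cons, h, decide_not, decide_true,
        Bool.not_true, Bool.false_eq_true, if_false, ih]
      have : pvStepB query b0 r = b0 := by simp [pvStepB, h]
      rw [this]
    · simp only [List.foldl_cons, List.filter_cons, h, decide_not, decide_false,
        Bool.not_false, if_true, List.map_cons, List.foldl_cons, ih]
      have : pvStepB query b0 r = pvStep2 query b0 ((PySem.Dict.mk r).getD "pod" "") := by
        simp [pvStepB, pvStep2, h]
      rw [this]


-- ===== VERDICT (by name: the statement is the Claim_ definition above) =====
theorem extract_pod_py_spec : Claim_equal_extract_pod_py := by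
  intro query data _
  unfold Spec_extract_pod_py extract_pod_py extract_pod_py_alt
  rw [pvFirstMatchA_sorted, pvFoldl_stepB_eq]
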